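-- pv_equiv track=rewrite | github.com/jmoon34/leetcode | array/largest_twice_others_easy.py | twice_others
-- ===== SOURCE A (Python) =====
-- def twice_others(nums):
--     max_index = [nums[0], 0]
--     for i in range(1, len(nums)):
--         if nums[i] > max_index[0]:
--             if nums[i] < 2*max_index[0]:
--                 max_index[1] = -1
--             else:
--                 max_index[1] = i
--             max_index[0] = nums[i]
--         else:
--             if nums[i]*2 > max_index[0]:
--                 max_index[1] = -1
--     return max_index[1]
-- ===== SOURCE B (Python) =====
-- def twice_others(nums):
--     largest = nums[0]
--     m = 0
--     for i in range(1, len(nums)):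
--         if nums[i] > largest:
--             largest = nums[i]
--             m = i
--     for i in range(len(nums)):
--         if i != m and 2 * nums[i] > largest:
--             return -1
--     return m
-- ===== Notes on version B (the rewrite author's own statement) =====
-- stated objective: simpler
-- what changed: Replaces A's single-pass state machine that toggles a -1 sentinel inside the max update with a plain two-pass decomposition: find the first max index, then verify no other element doubled exceeds the max.
import Mathlib
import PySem

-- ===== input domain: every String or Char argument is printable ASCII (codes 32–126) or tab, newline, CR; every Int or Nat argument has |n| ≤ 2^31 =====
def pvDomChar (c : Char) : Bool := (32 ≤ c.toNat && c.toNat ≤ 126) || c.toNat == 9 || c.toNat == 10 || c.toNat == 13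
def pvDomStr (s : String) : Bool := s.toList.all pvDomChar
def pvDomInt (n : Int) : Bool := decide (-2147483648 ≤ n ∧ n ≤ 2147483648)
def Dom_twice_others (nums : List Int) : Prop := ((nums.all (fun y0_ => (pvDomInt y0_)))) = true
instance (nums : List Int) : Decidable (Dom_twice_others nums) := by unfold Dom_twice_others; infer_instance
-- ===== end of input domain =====

-- B replaces A's single-pass sentinel-toggling state machine by a plain find-max pass
-- followed by a verification pass (same cost; objective: simpler).

-- ===== PORT A =====
def twice_others (nums : List Int) : Int :=
  match nums with
  | [] => 0   -- unreachable under Pre_ (Python raises IndexError on nums[0])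
  | x :: _ =>
    let st := (PySem.List.pyRange 1 (nums.length : Int) 1).foldl
      (fun (mi : Int × Int) i =>
        let v := PySem.List.pyGetD nums i 0
        if v > mi.1 then (v, if v < 2 * mi.1 then (-1 : Int) else i)
        else (mi.1, if v * 2 > mi.1 then (-1 : Int) else mi.2)) (x, (0 : Int))
    st.2

-- ===== PORT B =====
def twice_others_alt (nums : List Int) : Int :=
  match nums with
  | [] => 0   -- unreachable under Pre_ (Python raises IndexError on nums[0])
  | x :: _ =>
    let lm := (PySem.List.pyRange 1 (nums.length : Int) 1).foldl
      (fun (lm : Int × Int) i =>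
        let v := PySem.List.pyGetD nums i 0
        if v > lm.1 then (v, i) else lm) (x, (0 : Int))
    if (PySem.List.pyRange 0 (nums.length : Int) 1).any
        (fun i => (i != lm.2) && decide (2 * PySem.List.pyGetD nums i 0 > lm.1))
    then -1 else lm.2

-- ===== PRECONDITION & SPEC =====
-- Pre_ excludes only the empty list, on which both Pythons raise IndexError (nums[0]).
def Pre_twice_others (nums : List Int) : Prop := nums ≠ []
instance (nums : List Int) : Decidable (Pre_twice_others nums) := by unfold Pre_twice_others; infer_instance
def pvWitness_twice_others : List Int := [3, 1]

def Spec_twice_others (nums : List Int) (out : Int) : Prop := out = twice_others_alt nums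
instance (nums : List Int) (out : Int) : Decidable (Spec_twice_others nums out) := by unfold Spec_twice_others; infer_instance

-- ===== CLAIM (what is proved, stated in full; the proofs are below) =====
def Claim_equal_twice_others : Prop := ∀ (nums : List Int), Dom_twice_others nums → Pre_twice_others nums → Spec_twice_others nums (twice_others nums)

-- ===== LEMMAS AND PROOFS =====

-- A's loop body (on an (index, value) pair) and B's find-max body.
def pvStepA (mi : Int × Int) (i v : Int) : Int × Int :=
  if v > mi.1 then (v, if v < 2 * mi.1 then (-1 : Int) else i)
  else (mi.1, if v * 2 > mi.1 then (-1 : Int) else mi.2)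

def pvStepB (lm : Int × Int) (i v : Int) : Int × Int :=
  if v > lm.1 then (v, i) else lm

-- bridge: a foldl over range(k, len(xs)) reading xs[i] is a foldl over enumerate(xs[k:], k)
theorem pv_foldl_pyRange_enum {σ : Type} (xs : List Int) (f : σ → Int → Int → σ) (d : Int) :
    ∀ (k : Nat) (init : σ),
    (PySem.List.pyRange (k : Int) (xs.length : Int) 1).foldl
        (fun acc i => f acc i (PySem.List.pyGetD xs i d)) init
      = (PySem.List.enumerate (xs.drop k) (k : Int)).foldl (fun acc p => f acc p.1 p.2) init := by
  suffices H : ∀ (n k : Nat) (init : σ), xs.length - k = n →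
      (PySem.List.pyRange (k : Int) (xs.length : Int) 1).foldl
          (fun acc i => f acc i (PySem.List.pyGetD xs i d)) init
        = (PySem.List.enumerate (xs.drop k) (k : Int)).foldl (fun acc p => f acc p.1 p.2) init by
    exact fun k init => H _ k init rfl
  intro n
  induction n with
  | zero =>
    intro k init h
    rw [PySem.List.pyRange_one_eq_nil (by exact_mod_cast Nat.le_of_sub_eq_zero h),
      List.drop_eq_nil_of_le (Nat.le_of_sub_eq_zero h)]
    simp [PySem.List.enumerate]
  | succ n ih =>
    intro k init h
    have hlt : k < xs.length := by omega
    rw [PySem.List.pyRange_one_cons (by exact_mod_cast hlt), List.drop_eq_getElem_cons hlt,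
      PySem.List.enumerate_cons]
    simp only [List.foldl_cons]
    rw [PySem.List.pyGetD_eq_getElem xs d (by positivity) (by exact_mod_cast hlt)]
    have hc : ((k : Int) + 1) = ((k + 1 : Nat) : Int) := by push_cast; ring
    simp only [Int.toNat_natCast]
    rw [hc]
    exact ih (k + 1) _ (by omega)

theorem pv_any_pyRange_enum (xs : List Int) (p : Int → Int → Bool) (d : Int) :
    ∀ (k : Nat),
    (PySem.List.pyRange (k : Int) (xs.length : Int) 1).any
        (fun i => p i (PySem.List.pyGetD xs i d))
      = (PySem.List.enumerate (xs.drop k) (k : Int)).any (fun q => p q.1 q.2) := by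
  suffices H : ∀ (n k : Nat), xs.length - k = n →
      (PySem.List.pyRange (k : Int) (xs.length : Int) 1).any
          (fun i => p i (PySem.List.pyGetD xs i d))
        = (PySem.List.enumerate (xs.drop k) (k : Int)).any (fun q => p q.1 q.2) by
    exact fun k => H _ k rfl
  intro n
  induction n with
  | zero =>
    intro k h
    rw [PySem.List.pyRange_one_eq_nil (by exact_mod_cast Nat.le_of_sub_eq_zero h),
      List.drop_eq_nil_of_le (Nat.le_of_sub_eq_zero h)]
    simp [PySem.List.enumerate]
  | succ n ih =>
    intro k h
    have hlt : k < xs.length := by omega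
    rw [PySem.List.pyRange_one_cons (by exact_mod_cast hlt), List.drop_eq_getElem_cons hlt,
      PySem.List.enumerate_cons]
    simp only [List.any_cons]
    rw [PySem.List.pyGetD_eq_getElem xs d (by positivity) (by exact_mod_cast hlt)]
    have hc : ((k : Int) + 1) = ((k + 1 : Nat) : Int) := by push_cast; ring
    simp only [Int.toNat_natCast]
    rw [hc, ih (k + 1) (by omega)]

-- the same bridges for an Int lower bound
theorem pv_foldl_pyRange_enum' {σ : Type} (xs : List Int) (f : σ → Int → Int → σ) (d : Int)
    (k : Int) (hk : 0 ≤ k) (init : σ) :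
    (PySem.List.pyRange k (xs.length : Int) 1).foldl
        (fun acc i => f acc i (PySem.List.pyGetD xs i d)) init
      = (PySem.List.enumerate (xs.drop k.toNat) k).foldl (fun acc p => f acc p.1 p.2) init := by
  have h := pv_foldl_pyRange_enum xs f d k.toNat init
  rwa [Int.toNat_of_nonneg hk] at h

theorem pv_any_pyRange_enum' (xs : List Int) (p : Int → Int → Bool) (d : Int)
    (k : Int) (hk : 0 ≤ k) :
    (PySem.List.pyRange k (xs.length : Int) 1).any
        (fun i => p i (PySem.List.pyGetD xs i d))
      = (PySem.List.enumerate (xs.drop k.toNat) k).any (fun q => p q.1 q.2) := by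
  have h := pv_any_pyRange_enum xs p d k.toNat
  rwa [Int.toNat_of_nonneg hk] at h

-- behaviour of B's find-max fold: it either keeps the seed or returns an index from the list
theorem pv_foldB_spec (e : List (Int × Int)) : ∀ (mv m : Int),
    mv ≤ (e.foldl (fun acc p => pvStepB acc p.1 p.2) (mv, m)).1 ∧
    ((e.foldl (fun acc p => pvStepB acc p.1 p.2) (mv, m)) = (mv, m) ∨
      ((e.foldl (fun acc p => pvStepB acc p.1 p.2) (mv, m)).2 ∈ e.map Prod.fst ∧
        mv < (e.foldl (fun acc p => pvStepB acc p.1 p.2) (mv, m)).1)) := by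
  induction e with
  | nil => intro mv m; simp
  | cons q e ih =>
    intro mv m
    obtain ⟨j, v⟩ := q
    rw [List.foldl_cons, List.map_cons,
      show pvStepB (mv, m) (j, v).1 (j, v).2 = if v > mv then (v, j) else (mv, m) from by
        simp [pvStepB]]
    by_cases hv : v > mv
    · rw [if_pos hv]
      obtain ⟨h1, h2⟩ := ih v j
      refine ⟨le_of_lt (lt_of_lt_of_le hv h1), ?_⟩
      rcases h2 with h2 | ⟨h2, h3⟩
      · exact Or.inr ⟨by rw [h2]; exact List.mem_cons_self, by rw [h2]; exact hv⟩
      · exact Or.inr ⟨List.mem_cons_of_mem _ h2, lt_trans hv h3⟩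
    · rw [if_neg hv]
      obtain ⟨h1, h2⟩ := ih mv m
      refine ⟨h1, ?_⟩
      rcases h2 with h2 | ⟨h2, h3⟩
      · exact Or.inl h2
      · exact Or.inr ⟨List.mem_cons_of_mem _ h2, h3⟩

-- the main invariant relating A's fold to B's fold plus B's verification condition
theorem pv_main (e : List (Int × Int)) : ∀ (mv m idv : Int), 0 ≤ m →
    (idv = -1 ∨ idv = m) → (∀ p ∈ e, m < p.1) → e.Pairwise (fun p q => p.1 < q.1) →
    e.foldl (fun acc p => pvStepA acc p.1 p.2) (mv, idv)
      = ((e.foldl (fun acc p => pvStepB acc p.1 p.2) (mv, m)).1,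
         if (∃ p ∈ e, p.1 ≠ (e.foldl (fun acc p => pvStepB acc p.1 p.2) (mv, m)).2 ∧
               2 * p.2 > (e.foldl (fun acc p => pvStepB acc p.1 p.2) (mv, m)).1)
            ∨ (2 * mv > (e.foldl (fun acc p => pvStepB acc p.1 p.2) (mv, m)).1 ∧
               m ≠ (e.foldl (fun acc p => pvStepB acc p.1 p.2) (mv, m)).2)
            ∨ (idv = -1 ∧ m = (e.foldl (fun acc p => pvStepB acc p.1 p.2) (mv, m)).2)
         then -1 else (e.foldl (fun acc p => pvStepB acc p.1 p.2) (mv, m)).2) := by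
  induction e with
  | nil =>
    intro mv m idv h0 h1 h2 h3
    simp only [List.foldl_nil, List.not_mem_nil, false_and, exists_false,
      gt_iff_lt, false_or, ne_eq, not_true_eq_false, and_false, and_true]
    rcases h1 with h | h <;> subst h
    · simp
    · rw [if_neg (by omega)]
  | cons q e ih =>
    intro mv m idv h0 h1 h2 h3
    obtain ⟨j, v⟩ := q
    have hmj : m < j := h2 (j, v) List.mem_cons_self
    have hje : ∀ p ∈ e, j < p.1 := (List.pairwise_cons.mp h3).1
    have hme : ∀ p ∈ e, m < p.1 := fun p hp => lt_trans hmj (hje p hp)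
    have h3' := (List.pairwise_cons.mp h3).2
    simp only [List.foldl_cons]
    rw [show pvStepA (mv, idv) (j, v).1 (j, v).2
          = if v > mv then (v, if v < 2 * mv then (-1 : Int) else j)
            else (mv, if v * 2 > mv then (-1 : Int) else idv) from by simp [pvStepA],
        show pvStepB (mv, m) (j, v).1 (j, v).2 = if v > mv then (v, j) else (mv, m) from by
          simp [pvStepB]]
    by_cases hv : v > mv
    · rw [if_pos hv, if_pos hv]
      have h0' : (0 : Int) ≤ j := le_of_lt (lt_of_le_of_lt h0 hmj)
      have h1' : (if v < 2 * mv then (-1 : Int) else j) = -1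
          ∨ (if v < 2 * mv then (-1 : Int) else j) = j := by split_ifs <;> simp
      rw [ih v j _ h0' h1' hje h3']
      obtain ⟨hle, hcase⟩ := pv_foldB_spec e v j
      set r := e.foldl (fun acc p => pvStepB acc p.1 p.2) (v, j) with hr
      have hmr : m ≠ r.2 := by
        rcases hcase with h | ⟨h, _⟩
        · rw [h]; exact ne_of_lt hmj
        · obtain ⟨p, hp, hp2⟩ := List.mem_map.mp h
          have := hje p hp; omega
      congr 1
      apply if_congr _ rfl rfl
      simp only [List.exists_mem_cons_iff]
      by_cases hjM : j = r.2
      · have hrv : r = (v, j) := by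
          rcases hcase with h | ⟨h, _⟩
          · exact h
          · exfalso; obtain ⟨p, hp, hp2⟩ := List.mem_map.mp h
            have := hje p hp; omega
        rw [hrv]
        constructor
        · rintro (hE | ⟨ha, hb⟩ | ⟨ha, _⟩)
          · exact Or.inl (Or.inr hE)
          · omega
          · refine Or.inr (Or.inl ⟨by omega, by rw [hrv] at hmr; simp at hmr ⊢; omega⟩)
        · rintro ((⟨ha, hb⟩ | hE) | ⟨ha, _⟩ | ⟨_, hb⟩)
          · simp at ha
          · exact Or.inl hE
          · refine Or.inr (Or.inr ⟨by split_ifs with h; rfl; omega, rfl⟩)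
          · refine absurd hb.symm (by rw [hrv] at hmr; simp at hmr ⊢; omega)
      · have hrM : r.2 ∈ e.map Prod.fst ∧ v < r.1 := by
          rcases hcase with h | h
          · exact absurd (by rw [h]) hjM
          · exact h
        constructor
        · rintro (hE | ⟨ha, _⟩ | ⟨_, hb⟩)
          · exact Or.inl (Or.inr hE)
          · exact Or.inl (Or.inl ⟨hjM, ha⟩)
          · exact absurd hb.symm (fun h => hjM h.symm)
        · rintro ((⟨_, hb⟩ | hE) | ⟨ha, _⟩ | ⟨_, hb⟩)
          · exact Or.inr (Or.inl ⟨hb, hjM⟩)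
          · exact Or.inl hE
          · exact Or.inr (Or.inl ⟨by omega, hjM⟩)
          · exact absurd hb.symm (fun h => hmr h.symm)
    · rw [if_neg hv, if_neg hv]
      have h1' : (if v * 2 > mv then (-1 : Int) else idv) = -1
          ∨ (if v * 2 > mv then (-1 : Int) else idv) = m := by
        split_ifs
        · exact Or.inl rfl
        · exact h1
      rw [ih mv m _ h0 h1' hme h3']
      obtain ⟨hle, hcase⟩ := pv_foldB_spec e mv m
      set r := e.foldl (fun acc p => pvStepB acc p.1 p.2) (mv, m) with hr
      have hjr : j ≠ r.2 := by
        rcases hcase with h | ⟨h, _⟩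
        · rw [h]; omega
        · obtain ⟨p, hp, hp2⟩ := List.mem_map.mp h
          have := hje p hp; omega
      congr 1
      apply if_congr _ rfl rfl
      simp only [List.exists_mem_cons_iff]
      by_cases hmM : m = r.2
      · have hrm : r = (mv, m) := by
          rcases hcase with h | ⟨h, _⟩
          · exact h
          · exfalso; obtain ⟨p, hp, hp2⟩ := List.mem_map.mp h
            have := hme p hp; omega
        rw [hrm]
        constructor
        · rintro (hE | ⟨ha, hb⟩ | ⟨ha, _⟩)
          · exact Or.inl (Or.inr hE)
          · omega
          · by_cases hvv : v * 2 > mv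
            · exact Or.inl (Or.inl ⟨by rw [hrm] at hjr; simpa using hjr, by omega⟩)
            · rw [if_neg hvv] at ha
              exact Or.inr (Or.inr ⟨ha, rfl⟩)
        · rintro ((⟨_, hb⟩ | hE) | ⟨_, hb⟩ | ⟨ha, _⟩)
          · exact Or.inr (Or.inr ⟨by rw [if_pos (show v * 2 > mv by omega)], rfl⟩)
          · exact Or.inl hE
          · omega
          · refine Or.inr (Or.inr ⟨by split_ifs; rfl; exact ha, rfl⟩)
      · have hrM : r.2 ∈ e.map Prod.fst ∧ mv < r.1 := by
          rcases hcase with h | h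
          · exact absurd (by rw [h]) hmM
          · exact h
        constructor
        · rintro (hE | ⟨ha, hb⟩ | ⟨_, hb⟩)
          · exact Or.inl (Or.inr hE)
          · exact Or.inr (Or.inl ⟨ha, hb⟩)
          · exact absurd hb hmM
        · rintro ((⟨_, hb⟩ | hE) | ⟨ha, hb⟩ | ⟨_, hb⟩)
          · exact Or.inr (Or.inl ⟨by omega, hmM⟩)
          · exact Or.inl hE
          · exact Or.inr (Or.inl ⟨ha, hb⟩)
          · exact absurd hb hmM

-- ===== VERDICT (by name: the statement is the Claim_ definition above) =====
theorem twice_others_spec : Claim_equal_twice_others := by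
  intro nums _ hpre
  unfold Spec_twice_others
  cases nums with
  | nil => exact absurd rfl hpre
  | cons x t =>
    simp only [twice_others, twice_others_alt]
    rw [show (fun (mi : Int × Int) (i : Int) =>
          if PySem.List.pyGetD (x :: t) i 0 > mi.1 then
            (PySem.List.pyGetD (x :: t) i 0, if PySem.List.pyGetD (x :: t) i 0 < 2 * mi.1 then -1 else i)
          else (mi.1, if PySem.List.pyGetD (x :: t) i 0 * 2 > mi.1 then -1 else mi.2))
        = (fun (acc : Int × Int) (i : Int) => pvStepA acc i (PySem.List.pyGetD (x :: t) i 0)) from rfl,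
      show (fun (lm : Int × Int) (i : Int) =>
          if PySem.List.pyGetD (x :: t) i 0 > lm.1 then (PySem.List.pyGetD (x :: t) i 0, i) else lm)
        = (fun (acc : Int × Int) (i : Int) => pvStepB acc i (PySem.List.pyGetD (x :: t) i 0)) from rfl,
      pv_foldl_pyRange_enum' (x :: t) pvStepA 0 1 (by norm_num) (x, 0),
      pv_foldl_pyRange_enum' (x :: t) pvStepB 0 1 (by norm_num) (x, 0),
      show (x :: t).drop (1 : Int).toNat = t from rfl]
    set r := (PySem.List.enumerate t 1).foldl (fun acc p => pvStepB acc p.1 p.2) (x, (0 : Int)) with hr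
    rw [pv_any_pyRange_enum' (x :: t) (fun i v => (i != r.2) && decide (2 * v > r.1)) 0 0 le_rfl,
      show (x :: t).drop (0 : Int).toNat = x :: t from rfl]
    rw [pv_main (PySem.List.enumerate t 1) x 0 0 le_rfl (Or.inr rfl)
      (by
        intro p hp
        obtain ⟨k, hk, rfl⟩ := (PySem.List.mem_enumerate_iff t 1 p).mp hp
        simp only
        omega)
      (PySem.List.pairwise_lt_enumerate t 1)]
    rw [← hr]
    simp only [PySem.List.enumerate_cons, List.any_cons]
    apply if_congr _ rfl rfl
    simp only [List.any_eq_true, Bool.or_eq_true, Bool.and_eq_true, bne_iff_ne, decide_eq_true_eq]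
    constructor
    · rintro (hE | ⟨ha, hb⟩ | ⟨ha, _⟩)
      · obtain ⟨p, hp, h1, h2⟩ := hE
        exact Or.inr ⟨p, hp, ⟨by simpa using h1, by simpa using h2⟩⟩
      · exact Or.inl ⟨by omega, by omega⟩
      · exact absurd ha (by norm_num)
    · rintro (⟨ha, hb⟩ | ⟨p, hp, h1, h2⟩)
      · exact Or.inr (Or.inl ⟨by omega, by omega⟩)
      · exact Or.inl ⟨p, hp, by simpa using h1, by simpa using h2⟩
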